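-- pv_equiv track=rewrite | github.com/dhain/potpy | potpy/urltemplate.py | _parse_template
-- ===== SOURCE A (Python) =====
-- def _parse_template(template):
--     bracket_level = 0
--     start = 0
--     for i, c in enumerate(template):
--         if c == '{':
--             if not bracket_level:
--                 part = template[start:i].replace('\\', '\\\\')
--                 yield (part, None)
--                 start = i + 1
--             bracket_level += 1
--         elif c == '}':
--             if not bracket_level:
--                 continue
--             bracket_level -= 1
--             if not bracket_level:
--                 bracket = template[start:i]
--                 if ':' in bracket:
--                     name, regex = bracket.split(':', 1)
--                 else:
--                     name = bracket
--                     regex = '.*'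
--                 yield (regex, name)
--                 start = i + 1
--     if bracket_level:
--         raise ValueError()
--     part = template[start:].replace('\\', '\\\\')
--     yield (part, None)
-- ===== SOURCE B (Python) =====
-- def _parse_template(template):
--     rest = template
--     while True:
--         i = rest.find('{')
--         if i == -1:
--             yield (rest.replace('\\', '\\\\'), None)
--             return
--         yield (rest[:i].replace('\\', '\\\\'), None)
--         body, rest = _scan_body(rest[i + 1:])
--         c = body.find(':')
--         if c == -1:
--             yield ('.*', body)
--         else:
--             yield (body[c + 1:], body[:c])
--
--
-- def _scan_body(s):
--     depth = 1
--     for j, ch in enumerate(s):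
--         if ch == '{':
--             depth += 1
--         elif ch == '}':
--             depth -= 1
--             if depth == 0:
--                 return s[:j], s[j + 1:]
--     raise ValueError()
-- ===== Notes on version B (the rewrite author's own statement) =====
-- stated objective: alternative
-- what changed: Replaces A's single enumerate() state machine (bracket_level/start bookkeeping across every character) with a find-next-'{' / extract-balanced-body decomposition: an outer loop that jumps straight to the next '{' and an inner helper that extracts the balanced bracket body and the remaining string.
import Mathlib
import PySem

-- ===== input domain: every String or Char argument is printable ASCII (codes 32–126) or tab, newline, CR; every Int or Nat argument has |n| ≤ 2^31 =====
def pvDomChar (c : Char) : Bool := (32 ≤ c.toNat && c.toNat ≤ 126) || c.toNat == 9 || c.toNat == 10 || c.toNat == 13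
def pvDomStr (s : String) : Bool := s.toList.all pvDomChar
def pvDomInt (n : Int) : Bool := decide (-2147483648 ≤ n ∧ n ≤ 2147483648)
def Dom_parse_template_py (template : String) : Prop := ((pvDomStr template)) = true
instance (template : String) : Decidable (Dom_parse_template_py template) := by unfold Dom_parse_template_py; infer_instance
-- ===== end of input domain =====

-- B re-implements the scan as a find-the-next-'{' / extract-balanced-body decomposition instead of
-- A's single enumerate state machine; same values on every input on which A returns (A and B both
-- raise ValueError on unclosed '{', excluded by Pre_). Objective: alternative decomposition.

-- shared helper: port of str.replace('\\', '\\\\') — exact for this one-character pattern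
def pvEsc (s : List Char) : List Char := s.flatMap (fun c => if c = '\\' then ['\\', '\\'] else [c])

-- ===== PORT A =====
-- A's inline "if ':' in bracket: name, regex = bracket.split(':', 1) else …", verbatim
-- (split(':', 1) = text before / after the first ':'; exact for the one-character separator);
-- returned as (regex, name) i.e. the order A yields them in
def aSplit (bracket : List Char) : List Char × List Char :=
  if (':' : Char) ∈ bracket then
    (bracket.drop (bracket.findIdx (· = ':') + 1), bracket.take (bracket.findIdx (· = ':')))
  else (['.', '*'], bracket)

-- literal port of A's for-loop over enumerate(template): structural recursion over the remaining
-- characters carrying (i, bracket_level, start, out); template[x:y] = (full.take y).drop x.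
-- When bracket_level ≠ 0 at the end Python raises ValueError (excluded by Pre_); the port just
-- appends the final literal part there.
def aGo (full : List Char) : List Char → Nat → Int → Nat → List (String × Option String) → List (String × Option String)
  | [], _i, _level, start, out => out ++ [(String.mk (pvEsc (full.drop start)), none)]
  | c :: t, i, level, start, out =>
    if c = '{' then
      if level = 0 then
        aGo full t (i + 1) (level + 1) (i + 1)
          (out ++ [(String.mk (pvEsc ((full.take i).drop start)), none)])
      else aGo full t (i + 1) (level + 1) start out
    else if c = '}' then
      if level = 0 then aGo full t (i + 1) level start out
      else
        let level' := level - 1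
        if level' = 0 then
          let pr := aSplit ((full.take i).drop start)
          aGo full t (i + 1) level' (i + 1) (out ++ [(String.mk pr.1, some (String.mk pr.2))])
        else aGo full t (i + 1) level' start out
    else aGo full t (i + 1) level start out

def parse_template_py (template : String) : List (String × Option String) :=
  aGo template.toList template.toList 0 0 0 []

-- ===== PORT B =====
-- port of Source B's _scan_body: scan tracking depth, return (body before the matching '}', rest after);
-- none = the ValueError case (unclosed bracket)
def bScanBody : List Char → Nat → Option (List Char × List Char)
  | [], _ => none
  | c :: t, d =>
    if c = '{' then (bScanBody t (d + 1)).map (fun p => (c :: p.1, p.2))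
    else if c = '}' then
      if d = 1 then some ([], t)
      else (bScanBody t (d - 1)).map (fun p => (c :: p.1, p.2))
    else (bScanBody t d).map (fun p => (c :: p.1, p.2))

theorem bScanBody_length {s : List Char} {d : Nat} {b r : List Char}
    (h : bScanBody s d = some (b, r)) : r.length < s.length := by
  induction s generalizing d b r with
  | nil => simp [bScanBody] at h
  | cons c t ih =>
    simp only [bScanBody] at h
    split_ifs at h with h1 h2 h3
    · rcases Option.map_eq_some_iff.mp h with ⟨⟨b', r'⟩, hb, he⟩
      cases he; exact Nat.lt_trans (ih hb) (Nat.lt_succ_self _)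
    · simp at h; rcases h with ⟨_, h⟩; subst h; simp
    · rcases Option.map_eq_some_iff.mp h with ⟨⟨b', r'⟩, hb, he⟩
      cases he; exact Nat.lt_trans (ih hb) (Nat.lt_succ_self _)
    · rcases Option.map_eq_some_iff.mp h with ⟨⟨b', r'⟩, hb, he⟩
      cases he; exact Nat.lt_trans (ih hb) (Nat.lt_succ_self _)

-- port of Source B's body.find(':') split (exact for a one-character needle)
def pairOf (body : List Char) : String × Option String :=
  match body.findIdx? (· = ':') with
  | none => (".*", some (String.mk body))
  | some c => (String.mk (body.drop (c + 1)), some (String.mk (body.take c)))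

-- port of Source B's outer loop: rest.find('{') (exact for a one-char needle → findIdx?);
-- the bScanBody-none branch is Source B's ValueError after yielding the literal (excluded by Pre_).
def bGo (s : List Char) : List (String × Option String) :=
  match hfi : s.findIdx? (· = '{') with
  | none => [(String.mk (pvEsc s), none)]
  | some i =>
    match hsb : bScanBody (s.drop (i + 1)) 1 with
    | none => [(String.mk (pvEsc (s.take i)), none)]
    | some (body, rest) =>
      (String.mk (pvEsc (s.take i)), none) :: pairOf body :: bGo rest
termination_by s.length
decreasing_by
  have h1 := bScanBody_length hsb
  have h2 : (s.drop (i + 1)).length = s.length - (i + 1) := by simp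
  omega

def parse_template_py_alt (template : String) : List (String × Option String) :=
  bGo template.toList

-- ===== PRECONDITION & SPEC =====
-- running brace depth as Python A maintains it ('}' at depth 0 is ignored; Nat subtraction clamps)
def pvDepth : List Char → Nat → Nat
  | [], d => d
  | c :: t, d => pvDepth t (if c = '{' then d + 1 else if c = '}' then d - 1 else d)

-- Pre_ excludes exactly the templates with an unclosed '{', on which Python A (and B) raise ValueError
def Pre_parse_template_py (template : String) : Prop := pvDepth template.toList 0 = 0
instance (template : String) : Decidable (Pre_parse_template_py template) := by
  unfold Pre_parse_template_py; infer_instance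

def pvWitness_parse_template_py : String := "a{b:c}d{e}"

def Spec_parse_template_py (template : String) (out : List (String × Option String)) : Prop := out = parse_template_py_alt template
instance (template : String) (out : List (String × Option String)) : Decidable (Spec_parse_template_py template out) := by unfold Spec_parse_template_py; infer_instance

-- ===== CLAIM (what is proved, stated in full; the proofs are below) =====
def Claim_equal_parse_template_py : Prop := ∀ (template : String), Dom_parse_template_py template → Pre_parse_template_py template → Spec_parse_template_py template (parse_template_py template)

-- ===== LEMMAS AND PROOFS =====

theorem slice_mid {full mid s : List Char} {start : Nat}
    (h1 : full.drop start = mid ++ s) :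
    (full.take (start + mid.length)).drop start = mid := by
  rw [List.drop_take]
  have h : start + mid.length - start = mid.length := by omega
  rw [h, h1, List.take_left]

theorem drop_cons_succ {full : List Char} {i : Nat} {c : Char} {t : List Char}
    (h : full.drop i = c :: t) : full.drop (i + 1) = t := by
  have h2 := congrArg List.tail h
  simpa [List.tail_drop] using h2

theorem take_append_len {mid x : List Char} : (mid ++ x).take mid.length = mid := by
  induction mid with
  | nil => simp
  | cons a m ih => simp [ih]

theorem drop_append_len {mid x : List Char} (n : Nat) :
    (mid ++ x).drop (mid.length + n) = x.drop n := by
  induction mid with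
  | nil => simp
  | cons a m ih => simpa [Nat.succ_add] using ih

theorem findIdx?_no_open {mid : List Char} (h : ∀ c ∈ mid, c ≠ '{') :
    mid.findIdx? (· = '{') = none :=
  List.findIdx?_eq_none_iff.mpr (by intro c hc; simpa using h c hc)

theorem findIdx?_append_open {mid t : List Char} (h : ∀ c ∈ mid, c ≠ '{') :
    (mid ++ '{' :: t).findIdx? (· = '{') = some mid.length := by
  induction mid with
  | nil => simp [List.findIdx?_cons]
  | cons a m ih =>
    have ha : a ≠ '{' := h a (by simp)
    rw [List.cons_append, List.findIdx?_cons]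
    simp [ha, ih (fun c hc => h c (by simp [hc]))]

-- A's inline ':'-split equals B's pairOf
theorem pairOf_eq (bracket : List Char) :
    ((String.mk (aSplit bracket).1 : String), some (String.mk (aSplit bracket).2)) = pairOf bracket := by
  unfold aSplit pairOf
  rcases h : bracket.findIdx? (· = ':') with _ | k
  · have hn : (':' : Char) ∉ bracket := by
      intro hm
      have h2 := List.findIdx?_eq_none_iff.mp h ':' hm
      simp at h2
    simp [hn]
    rfl
  · obtain ⟨hk1, hk2⟩ := (List.findIdx?_eq_some_iff_findIdx_eq).mp h
    obtain ⟨hlt, hp, -⟩ := List.findIdx?_eq_some_iff_getElem.mp h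
    have hmem : (':' : Char) ∈ bracket := by
      have hg : bracket[k] = ':' := by simpa using hp
      rw [← hg]; exact List.getElem_mem _
    simp [hmem, hk2]

-- depth bookkeeping: a balanced suffix at depth d ≥ 1 is successfully scanned by bScanBody
theorem scan_of_depth : ∀ (s : List Char) (d : Nat), 1 ≤ d → pvDepth s d = 0 →
    ∃ b r, bScanBody s d = some (b, r) ∧ pvDepth r 0 = 0 := by
  intro s
  induction s with
  | nil => intro d hd h; simp [pvDepth] at h; omega
  | cons c t ih =>
    intro d hd h
    by_cases hc : c = '{'
    · simp only [pvDepth, hc, if_pos] at h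
      obtain ⟨b, r, hs, hr⟩ := ih (d + 1) (by omega) h
      exact ⟨c :: b, r, by simp [bScanBody, hc, hs], hr⟩
    · by_cases hc2 : c = '}'
      · simp only [pvDepth, hc, hc2, if_neg, if_pos, if_false, ite_false, ite_true] at h
        by_cases hd1 : d = 1
        · subst hd1
          refine ⟨[], t, by simp [bScanBody, hc, hc2], ?_⟩
          simpa [hc, hc2] using h
        · have h' : pvDepth t (d - 1) = 0 := by simpa [hc, hc2] using h
          obtain ⟨b, r, hs, hr⟩ := ih (d - 1) (by omega) h'
          exact ⟨c :: b, r, by simp [bScanBody, hc, hc2, hd1, hs], hr⟩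
      · have h' : pvDepth t d = 0 := by simpa [pvDepth, hc, hc2] using h
        obtain ⟨b, r, hs, hr⟩ := ih d hd h'
        exact ⟨c :: b, r, by simp [bScanBody, hc, hc2, hs], hr⟩

-- equation lemmas for bGo
theorem bGo_no_open {s : List Char} (h : s.findIdx? (· = '{') = none) :
    bGo s = [(String.mk (pvEsc s), none)] := by
  rw [bGo]
  split
  · rfl
  · simp_all

theorem bGo_open {s : List Char} {i : Nat} {body rest : List Char}
    (h : s.findIdx? (· = '{') = some i)
    (hs : bScanBody (s.drop (i + 1)) 1 = some (body, rest)) :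
    bGo s = (String.mk (pvEsc (s.take i)), none) :: pairOf body :: bGo rest := by
  rw [bGo]
  split
  · simp_all
  · rename_i i' heq
    rw [h] at heq
    cases heq
    split
    · simp_all
    · rename_i body' rest' heq2
      rw [hs] at heq2
      cases heq2
      rfl

-- main invariant: M0 (outside brackets, level = 0) and M1 (inside a bracket, level = d ≥ 1)
theorem main_inv : ∀ (n : Nat) (s : List Char), s.length ≤ n →
    (∀ (full : List Char) (i start : Nat) (mid : List Char) (out : List (String × Option String)),
      full.drop start = mid ++ s → i = start + mid.length → full.drop i = s →
      (∀ c ∈ mid, c ≠ '{') → pvDepth s 0 = 0 →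
      aGo full s i 0 start out = out ++ bGo (mid ++ s)) ∧
    (∀ (full : List Char) (i start : Nat) (mid : List Char) (out : List (String × Option String))
       (d : Nat) (b r : List Char), 1 ≤ d →
      full.drop start = mid ++ s → i = start + mid.length → full.drop i = s →
      bScanBody s d = some (b, r) → pvDepth r 0 = 0 →
      aGo full s i (d : Int) start out = out ++ pairOf (mid ++ b) :: bGo r) := by
  intro n
  induction n with
  | zero =>
    intro s hs
    have hnil : s = [] := by
      cases s with
      | nil => rfl
      | cons a t => simp at hs
    subst hnil
    constructor
    · intro full i start mid out h1 h2 h3 h4 h5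
      have hmid : full.drop start = mid := by simpa using h1
      have hred : aGo full [] i 0 start out = out ++ [(String.mk (pvEsc (full.drop start)), none)] := rfl
      rw [hred, hmid, List.append_nil, bGo_no_open (findIdx?_no_open (by simpa using h4))]
    · intro full i start mid out d b r hd h1 h2 h3 hscan hr
      have hnone : bScanBody ([] : List Char) d = none := rfl
      rw [hnone] at hscan
      cases hscan
  | succ n ihn =>
    intro s hs
    cases s with
    | nil => exact ihn [] (by simp)
    | cons c t =>
      have ht : t.length ≤ n := by simpa using hs
      constructor
      · -- M0: level = 0
        intro full i start mid out h1 h2 h3 h4 h5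
        have hstep : full.drop (i + 1) = t := drop_cons_succ h3
        by_cases hc : c = '{'
        · subst hc
          have hmid : (full.take i).drop start = mid := by rw [h2]; exact slice_mid h1
          have hdepth : pvDepth t 1 = 0 := by simpa [pvDepth] using h5
          obtain ⟨b, r, hscan, hr⟩ := scan_of_depth t 1 (by omega) hdepth
          have hred : aGo full ('{' :: t) i 0 start out
              = aGo full t (i + 1) ((1 : Nat) : Int) (i + 1)
                  (out ++ [(String.mk (pvEsc mid), none)]) := by
            simp [aGo, hmid]
          have hM1 := (ihn t ht).2 full (i + 1) (i + 1) []
            (out ++ [(String.mk (pvEsc mid), none)]) 1 b r (by omega)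
            (by simpa using hstep) (by simp) hstep hscan hr
          rw [hred, hM1]
          have hscan' : bScanBody ((mid ++ '{' :: t).drop (mid.length + 1)) 1 = some (b, r) := by
            rw [drop_append_len]; simpa using hscan
          rw [bGo_open (findIdx?_append_open h4) hscan']
          rw [take_append_len]
          simp
        · have h1' : full.drop start = (mid ++ [c]) ++ t := by simpa using h1
          have h2' : i + 1 = start + (mid ++ [c]).length := by
            simp only [List.length_append, List.length_cons, List.length_nil]; omega
          have h4' : ∀ x ∈ mid ++ [c], x ≠ '{' := by
            intro x hx; rcases List.mem_append.mp hx with hx | hx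
            · exact h4 x hx
            · simp at hx; subst hx; exact hc
          have h5' : pvDepth t 0 = 0 := by
            by_cases hc2 : c = '}' <;> simpa [pvDepth, hc, hc2] using h5
          have hM0 := (ihn t ht).1 full (i + 1) start (mid ++ [c]) out h1' h2' hstep h4' h5'
          by_cases hc2 : c = '}'
          · subst hc2
            have hred : aGo full ('}' :: t) i 0 start out = aGo full t (i + 1) 0 start out := by
              simp [aGo]
            rw [hred, hM0]; simp
          · have hred : aGo full (c :: t) i 0 start out = aGo full t (i + 1) 0 start out := by
              simp [aGo, hc, hc2]
            rw [hred, hM0]; simp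
      · -- M1: level = d ≥ 1
        intro full i start mid out d b r hd h1 h2 h3 hscan hr
        have hstep : full.drop (i + 1) = t := drop_cons_succ h3
        have hlv : ¬ ((d : Int) = 0) := by omega
        by_cases hc : c = '{'
        · subst hc
          simp only [bScanBody, if_pos] at hscan
          rcases Option.map_eq_some_iff.mp hscan with ⟨⟨b', r'⟩, hb', he⟩
          cases he
          have hM1 := (ihn t ht).2 full (i + 1) start (mid ++ ['{']) out (d + 1) b' r' (by omega)
            (by simpa using h1)
            (by simp only [List.length_append, List.length_cons, List.length_nil]; omega)
            hstep hb' hr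
          have hred : aGo full ('{' :: t) i (d : Int) start out
              = aGo full t (i + 1) ((d : Int) + 1) start out := by
            simp [aGo]
            intro h
            exact absurd h (by omega)
          have hcast : ((d : Int) + 1) = (((d + 1 : Nat)) : Int) := by push_cast; ring
          rw [hred, hcast, hM1]
          simp
        · by_cases hc2 : c = '}'
          · subst hc2
            simp only [bScanBody] at hscan
            rw [if_neg (by simp [hc]), if_pos (by simp)] at hscan
            by_cases hd1 : d = 1
            · subst hd1
              rw [if_pos rfl] at hscan
              have hbr : ([] : List Char) = b ∧ t = r := by
                have h' := Option.some.injEq _ _ ▸ hscan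
                exact ⟨congrArg Prod.fst (Option.some.inj hscan), congrArg Prod.snd (Option.some.inj hscan)⟩
              obtain ⟨hb0, hr0⟩ := hbr
              subst hb0
              subst hr0
              have hmid : (full.take i).drop start = mid := by rw [h2]; exact slice_mid h1
              have hred : aGo full ('}' :: t) i ((1 : Nat) : Int) start out
                  = aGo full t (i + 1) 0 (i + 1)
                      (out ++ [(String.mk (aSplit mid).1, some (String.mk (aSplit mid).2))]) := by
                norm_num [aGo, hmid]
                intro h
                simp at h
              have hM0 := (ihn t ht).1 full (i + 1) (i + 1) []
                (out ++ [(String.mk (aSplit mid).1, some (String.mk (aSplit mid).2))])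
                (by simpa using hstep) (by simp) hstep (by simp) hr
              rw [hred, hM0, pairOf_eq]
              simp
            · rw [if_neg hd1] at hscan
              rcases Option.map_eq_some_iff.mp hscan with ⟨⟨b', r'⟩, hb', he⟩
              cases he
              have hM1 := (ihn t ht).2 full (i + 1) start (mid ++ ['}']) out (d - 1) b' r'
                (by omega) (by simpa using h1)
                (by simp only [List.length_append, List.length_cons, List.length_nil]; omega)
                hstep hb' hr
              have hne : ¬ ((d : Int) - 1 = 0) := by omega
              have hred : aGo full ('}' :: t) i (d : Int) start out
                  = aGo full t (i + 1) ((d : Int) - 1) start out := by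
                simp [aGo, hne]
                intro h
                exact absurd h (by omega)
              have hcast : ((d : Int) - 1) = (((d - 1 : Nat)) : Int) := by omega
              rw [hred, hcast, hM1]
              simp
          · rw [show bScanBody (c :: t) d = (bScanBody t d).map (fun p => (c :: p.1, p.2)) from by
              simp [bScanBody, hc, hc2]] at hscan
            rcases Option.map_eq_some_iff.mp hscan with ⟨⟨b', r'⟩, hb', he⟩
            cases he
            have hM1 := (ihn t ht).2 full (i + 1) start (mid ++ [c]) out d b' r' hd
              (by simpa using h1)
              (by simp only [List.length_append, List.length_cons, List.length_nil]; omega)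
              hstep hb' hr
            have hred : aGo full (c :: t) i (d : Int) start out
                = aGo full t (i + 1) (d : Int) start out := by
              simp [aGo, hc, hc2]
            rw [hred, hM1]
            simp

-- ===== VERDICT (by name: the statement is the Claim_ definition above) =====
theorem parse_template_py_spec : Claim_equal_parse_template_py := by
  intro template _hdom hpre
  unfold Spec_parse_template_py parse_template_py parse_template_py_alt
  have h := (main_inv template.toList.length template.toList le_rfl).1 template.toList 0 0 [] []
    (by simp) (by simp) (by simp) (by simp) hpre
  simpa using h
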